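-- pv_equiv track=rewrite | github.com/ryan-blinn/skydio-network-tester | app.py | _prefix_to_mask
-- ===== SOURCE A (Python) =====
-- def _prefix_to_mask(prefix):
--     try:
--         p = int(prefix)
--         if p < 0 or p > 32:
--             return None
--         bits = ('1' * p).ljust(32, '0')
--         return '.'.join(str(int(bits[i:i+8], 2)) for i in range(0, 32, 8))
--     except Exception:
--         return None
-- ===== SOURCE B (Python) =====
-- def _prefix_to_mask(prefix):
--     try:
--         p = int(prefix)
--     except Exception:
--         return None
--     if p < 0 or p > 32:
--         return None
--     mask = (0xFFFFFFFF << (32 - p)) & 0xFFFFFFFF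
--     return '.'.join(str((mask >> s) & 0xFF) for s in (24, 16, 8, 0))
-- ===== Notes on version B (the rewrite author's own statement) =====
-- stated objective: idiomatic
-- what changed: B computes the netmask as a single 32-bit integer via shift-and-mask bit arithmetic and extracts each octet by shifting, instead of building a textual bit string, slicing it into four 8-character pieces and re-parsing each piece as a base-2 integer.
import Mathlib
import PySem

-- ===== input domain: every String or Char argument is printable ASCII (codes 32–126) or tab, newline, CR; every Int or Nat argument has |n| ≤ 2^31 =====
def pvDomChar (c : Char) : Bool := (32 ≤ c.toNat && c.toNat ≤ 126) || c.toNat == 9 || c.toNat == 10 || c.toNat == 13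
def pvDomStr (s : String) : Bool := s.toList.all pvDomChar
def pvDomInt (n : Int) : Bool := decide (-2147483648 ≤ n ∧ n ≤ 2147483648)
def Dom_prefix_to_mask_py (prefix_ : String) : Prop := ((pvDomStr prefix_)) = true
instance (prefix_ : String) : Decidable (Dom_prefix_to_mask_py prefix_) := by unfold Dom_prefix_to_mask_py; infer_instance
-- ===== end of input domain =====

-- B replaces A's bit-string build/slice/re-parse by 32-bit integer shift/mask arithmetic (idiomatic; same cost).


-- ===== PORT A =====
-- body after a successful int(prefix): range guard, bit string, slice-and-parse octets
def pvAcore (p : Int) : Option String :=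
  if p < 0 || p > 32 then none
  else
    -- bits = ('1' * p).ljust(32, '0')  (ljust ported by hand: pad right with '0' to length 32; exact, no cap)
    let ones := PySem.List.pyRepeat ['1'] p
    let bits := ones ++ List.replicate (32 - ones.length) '0'
    -- int(bits[i:i+8], 2): never raises here since bits is all '0'/'1'; .getD 0 is unreachable
    some (PySem.Str.join "." ((PySem.List.pyRange 0 32 8).map (fun i =>
      PySem.Int.toStr ((PySem.Int.ofCharsBase? (PySem.List.slice bits (some i) (some (i + 8))) 2).getD 0))))

def prefix_to_mask_py (prefix_ : String) : Option String :=
  match PySem.Int.ofStr? prefix_ with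
  | none => none          -- int() raised; except Exception: return None
  | some p => pvAcore p

-- ===== PORT B =====
def pvBcore (p : Int) : Option String :=
  if p < 0 || p > 32 then none
  else
    -- Python << >> & on the nonnegative ints reached here are Int.shiftLeft/shiftRight/land exactly
    let mask : Int := Int.land ((0xFFFFFFFF : Int) <<< (32 - p)) 0xFFFFFFFF
    some (PySem.Str.join "." (([24, 16, 8, 0] : List Int).map (fun s =>
      PySem.Int.toStr (Int.land (mask >>> s) 0xFF))))

def prefix_to_mask_py_alt (prefix_ : String) : Option String :=
  match PySem.Int.ofStr? prefix_ with
  | none => none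
  | some p => pvBcore p

-- ===== PRECONDITION & SPEC =====
def Spec_prefix_to_mask_py (prefix_ : String) (out : Option String) : Prop := out = prefix_to_mask_py_alt prefix_
instance (prefix_ : String) (out : Option String) : Decidable (Spec_prefix_to_mask_py prefix_ out) := by unfold Spec_prefix_to_mask_py; infer_instance

-- ===== CLAIM (what is proved, stated in full; the proofs are below) =====
def Claim_equal_prefix_to_mask_py : Prop := ∀ (prefix_ : String), Dom_prefix_to_mask_py prefix_ → Spec_prefix_to_mask_py prefix_ (prefix_to_mask_py prefix_)

-- ===== LEMMAS AND PROOFS =====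
theorem pvCore_eq (p : Int) : pvAcore p = pvBcore p := by
  by_cases h : p < 0 || p > 32
  · simp [pvAcore, pvBcore, h]
  · have hb : ¬ (p < 0 ∨ 32 < p) := by simpa [decide_eq_true_eq] using h
    have h0 : 0 ≤ p := by omega
    have h32 : p ≤ 32 := by omega
    interval_cases p <;> decide

-- ===== VERDICT (by name: the statement is the Claim_ definition above) =====
theorem prefix_to_mask_py_spec : Claim_equal_prefix_to_mask_py := by
  intro prefix_ _
  unfold Spec_prefix_to_mask_py prefix_to_mask_py prefix_to_mask_py_alt
  cases PySem.Int.ofStr? prefix_ with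
  | none => rfl
  | some p => exact pvCore_eq p
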